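-- pv_equiv track=rewrite | github.com/machops/ecosystem | backend/ai/engines/folding/vector_folding.py | _chunk_source_code
-- ===== SOURCE A (Python) =====
-- def _chunk_source_code(content: str, language: str | None) -> list[str]:
--     """Chunk source code by function/class boundaries."""
--     lines = content.split("\n")
--     chunks: list[str] = []
--     current: list[str] = []
--     boundary_keywords = {"def ", "class ", "function ", "func ", "pub fn ", "public ", "private ", "protected "}
--
--     for line in lines:
--         stripped = line.lstrip()
--         if any(stripped.startswith(kw) for kw in boundary_keywords) and current:
--             chunk_text = "\n".join(current).strip()
--             if chunk_text:
--                 chunks.append(chunk_text)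
--             current = [line]
--         else:
--             current.append(line)
--
--     if current:
--         chunk_text = "\n".join(current).strip()
--         if chunk_text:
--             chunks.append(chunk_text)
--
--     return chunks if chunks else [content]
-- ===== SOURCE B (Python) =====
-- def _chunk_source_code(content: str, language: str | None) -> list[str]:
--     """Two-stage: compute boundary line indices, then slice the line list at them."""
--     lines = content.split("\n")
--     keywords = ("def ", "class ", "function ", "func ", "pub fn ",
--                 "public ", "private ", "protected ")
--     bounds = [i for i, line in enumerate(lines)
--               if i > 0 and line.lstrip().startswith(keywords)]
--     starts = [0] + bounds
--     ends = bounds + [len(lines)]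
--     chunks = []
--     for a, b in zip(starts, ends):
--         text = "\n".join(lines[a:b]).strip()
--         if text:
--             chunks.append(text)
--     return chunks if chunks else [content]
-- ===== Notes on version B (the rewrite author's own statement) =====
-- stated objective: alternative
-- what changed: B replaces A's stateful buffer scan with index arithmetic: it first computes the list of boundary line indices (skipping index 0), then slices the line list between consecutive boundaries and joins/strips/filters each slice, maintaining no current-chunk buffer at all.
import Mathlib
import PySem

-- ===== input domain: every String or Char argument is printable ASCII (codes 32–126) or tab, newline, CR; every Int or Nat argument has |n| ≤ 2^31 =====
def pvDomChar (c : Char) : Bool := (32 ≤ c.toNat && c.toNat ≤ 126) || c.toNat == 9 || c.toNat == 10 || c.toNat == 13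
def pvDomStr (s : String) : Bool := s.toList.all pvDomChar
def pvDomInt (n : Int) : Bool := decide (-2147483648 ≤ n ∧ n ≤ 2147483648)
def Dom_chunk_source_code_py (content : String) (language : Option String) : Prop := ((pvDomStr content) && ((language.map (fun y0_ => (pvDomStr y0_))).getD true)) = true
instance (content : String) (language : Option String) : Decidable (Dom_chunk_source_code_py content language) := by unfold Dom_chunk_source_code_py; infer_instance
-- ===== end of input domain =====

-- B computes the boundary line indices first and then slices the line list between
-- consecutive boundaries (no running chunk buffer); objective: alternative, same cost.

-- ===== PORT A =====
-- boundary_keywords is a Python set read only under `any` (order-independent), ported as the literal list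
def pvKeywords : List String :=
  ["def ", "class ", "function ", "func ", "pub fn ", "public ", "private ", "protected "]

-- any(stripped.startswith(kw) for kw in boundary_keywords), stripped = line.lstrip()
def pvIsBoundary (line : String) : Bool :=
  pvKeywords.any (fun kw => PySem.Str.startswith (PySem.Str.lstrip line) kw)

-- "\n".join(cur).strip()
def pvJoinStrip (cur : List String) : String :=
  PySem.Str.strip (PySem.Str.join "\n" cur)

-- one iteration of A's for-loop over state (chunks, current)
def pvStepA (st : List String × List String) (line : String) : List String × List String :=
  if pvIsBoundary line && !st.2.isEmpty then
    let ct := pvJoinStrip st.2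
    (if ct ≠ "" then st.1 ++ [ct] else st.1, [line])
  else
    (st.1, st.2 ++ [line])

def chunk_source_code_py (content : String) (language : Option String) : List String :=
  let lines : List String := (PySem.Chars.splitOn content.toList "\n".toList).map String.ofList
  let st := lines.foldl pvStepA ([], [])
  let chunks :=
    if !st.2.isEmpty then
      let ct := pvJoinStrip st.2
      if ct ≠ "" then st.1 ++ [ct] else st.1
    else st.1
  if chunks.isEmpty then [content] else chunks

-- ===== PORT B =====
-- [i for i, line in enumerate(lines) if i > 0 and line.lstrip().startswith(keywords)]
def pvBounds (lines : List String) : List Int :=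
  ((PySem.List.enumerate lines 0).filter
    (fun p => decide (0 < p.1) && pvIsBoundary p.2)).map Prod.fst

def chunk_source_code_py_alt (content : String) (language : Option String) : List String :=
  let lines : List String := (PySem.Chars.splitOn content.toList "\n".toList).map String.ofList
  let bounds := pvBounds lines
  let starts := 0 :: bounds
  let ends := bounds ++ [(lines.length : Int)]
  -- for a, b in zip(starts, ends): text = "\n".join(lines[a:b]).strip(); if text: chunks.append(text)
  let chunks := (starts.zip ends).foldl
    (fun acc p =>
      let text := pvJoinStrip (PySem.List.slice lines (some p.1) (some p.2))
      if text ≠ "" then acc ++ [text] else acc) []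
  if chunks.isEmpty then [content] else chunks

-- ===== PRECONDITION & SPEC =====
def Spec_chunk_source_code_py (content : String) (language : Option String) (out : List String) : Prop := out = chunk_source_code_py_alt content language
instance (content : String) (language : Option String) (out : List String) : Decidable (Spec_chunk_source_code_py content language out) := by unfold Spec_chunk_source_code_py; infer_instance

-- ===== CLAIM (what is proved, stated in full; the proofs are below) =====
def Claim_equal_chunk_source_code_py : Prop := ∀ (content : String) (language : Option String), Dom_chunk_source_code_py content language → Spec_chunk_source_code_py content language (chunk_source_code_py content language)

-- ===== LEMMAS AND PROOFS =====

-- proof-side segmentation step: start a new segment at a boundary line, else extend the last one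
def pvStepB (segs : List (List String)) (line : String) : List (List String) :=
  if pvIsBoundary line then segs ++ [[line]]
  else segs.dropLast ++ [segs.getLastD [] ++ [line]]

-- render-and-filter of a list of segments
def pvRenderAll (segs : List (List String)) : List String :=
  (segs.map pvJoinStrip).filter (fun text => text ≠ "")

-- B's list of slices for a given line list
def pvSlices (lines : List String) : List (List String) :=
  ((0 :: pvBounds lines).zip (pvBounds lines ++ [(lines.length : Int)])).map
    (fun p => PySem.List.slice lines (some p.1) (some p.2))

lemma pvRenderAll_concat (init : List (List String)) (last : List String) :
    pvRenderAll (init ++ [last]) =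
      pvRenderAll init ++ (if pvJoinStrip last ≠ "" then [pvJoinStrip last] else []) := by
  simp only [pvRenderAll, List.map_append, List.filter_append, List.map_cons, List.map_nil,
    List.filter_cons, List.filter_nil]
  split_ifs with h <;> simp_all

-- loop invariant: the segment fold, rendered, equals A's fold followed by A's final flush
lemma pv_loop (t : List String) : ∀ (init : List (List String)) (last : List String),
    last ≠ [] →
    pvRenderAll (t.foldl pvStepB (init ++ [last])) =
      (let st := t.foldl pvStepA (pvRenderAll init, last)
       if !st.2.isEmpty then
         (if pvJoinStrip st.2 ≠ "" then st.1 ++ [pvJoinStrip st.2] else st.1)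
       else st.1) := by
  induction t with
  | nil =>
    intro init last hlast
    simp only [List.foldl_nil, pvRenderAll_concat]
    have : (!last.isEmpty) = true := by simp [hlast]
    rw [this]
    simp only [if_true]
    split_ifs <;> simp
  | cons l t ih =>
    intro init last hlast
    simp only [List.foldl_cons]
    by_cases hb : pvIsBoundary l
    · have hB : pvStepB (init ++ [last]) l = (init ++ [last]) ++ [[l]] := by
        simp [pvStepB, hb]
      have hA : pvStepA (pvRenderAll init, last) l =
          (pvRenderAll (init ++ [last]), [l]) := by
        simp only [pvStepA, hb, Bool.true_and]
        have : (!last.isEmpty) = true := by simp [hlast]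
        rw [this, if_pos rfl, pvRenderAll_concat]
        split_ifs <;> simp
      rw [hB, hA, ih (init ++ [last]) [l] (by simp)]
    · have hB : pvStepB (init ++ [last]) l = init ++ [last ++ [l]] := by
        simp [pvStepB, hb]
      have hA : pvStepA (pvRenderAll init, last) l = (pvRenderAll init, last ++ [l]) := by
        simp [pvStepA, hb]
      rw [hB, hA, ih init (last ++ [l]) (by simp)]

-- every boundary index is a positive position inside the line list
lemma pvBounds_mem {lines : List String} {i : Int} (h : i ∈ pvBounds lines) :
    0 < i ∧ i < (lines.length : Int) := by
  simp only [pvBounds, List.mem_map, List.mem_filter] at h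
  obtain ⟨p, ⟨hmem, hcond⟩, rfl⟩ := h
  rw [PySem.List.mem_enumerate_iff] at hmem
  obtain ⟨k, hk, rfl⟩ := hmem
  simp only [Bool.and_eq_true, decide_eq_true_eq] at hcond
  refine ⟨hcond.1, ?_⟩
  show ((0 + k : Nat) : Int) < (lines.length : Int)
  omega

-- every start index is a nonneg position at most the length
lemma pv_starts_mem {lines : List String} {a : Int} (h : a ∈ 0 :: pvBounds lines) :
    0 ≤ a ∧ a ≤ (lines.length : Int) := by
  rcases List.mem_cons.mp h with rfl | h
  · exact ⟨le_refl 0, Int.natCast_nonneg _⟩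
  · have := pvBounds_mem h; omega

-- appending a line does not change a slice that ends within the old list
lemma pv_slice_frozen (l : List String) (x : String) (a b : Int)
    (ha0 : 0 ≤ a) (ha : a ≤ (l.length : Int)) (hb0 : 0 ≤ b) (hb : b ≤ (l.length : Int)) :
    PySem.List.slice (l ++ [x]) (some a) (some b) = PySem.List.slice l (some a) (some b) := by
  obtain ⟨a', rfl⟩ := Int.eq_ofNat_of_zero_le ha0
  obtain ⟨b', rfl⟩ := Int.eq_ofNat_of_zero_le hb0
  have ha' : a' ≤ l.length := by exact_mod_cast ha
  have hb' : b' ≤ l.length := by exact_mod_cast hb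
  rw [PySem.List.slice_natCast, PySem.List.slice_natCast,
    List.drop_append_of_le_length ha',
    List.take_append_of_le_length (by simp [List.length_drop]; omega)]

-- the slice from a (≤ n) to n+1 of l ++ [x] is the slice from a to n of l, plus x
lemma pv_slice_snoc (l : List String) (x : String) (a : Int)
    (ha0 : 0 ≤ a) (ha : a ≤ (l.length : Int)) :
    PySem.List.slice (l ++ [x]) (some a) (some ((l.length : Int) + 1)) =
      PySem.List.slice l (some a) (some (l.length : Int)) ++ [x] := by
  obtain ⟨a', rfl⟩ := Int.eq_ofNat_of_zero_le ha0
  have ha' : a' ≤ l.length := by exact_mod_cast ha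
  have h1 : ((l.length : Int) + 1) = ((l.length + 1 : Nat) : Int) := by push_cast; ring
  rw [h1, PySem.List.slice_natCast, PySem.List.slice_natCast,
    List.drop_append_of_le_length ha',
    List.take_of_length_le (by simp [List.length_drop]; omega),
    List.take_of_length_le (by simp [List.length_drop])]

-- boundary indices of l ++ [x] (l nonempty): those of l, plus l.length if x is a boundary line
lemma pvBounds_snoc (l : List String) (x : String) (hl : l ≠ []) :
    pvBounds (l ++ [x]) =
      pvBounds l ++ (if pvIsBoundary x then [(l.length : Int)] else []) := by
  have hlen : 0 < l.length := List.length_pos_of_ne_nil hl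
  simp only [pvBounds, PySem.List.enumerate_append, List.filter_append, List.map_append,
    PySem.List.enumerate_cons, PySem.List.enumerate_nil, List.filter_cons, List.filter_nil]
  by_cases hx : pvIsBoundary x <;> simp [hx, hlen]

-- one appended line extends the slice decomposition exactly as pvStepB does
lemma pvSlices_snoc (l : List String) (x : String) (hl : l ≠ []) :
    pvSlices (l ++ [x]) = pvStepB (pvSlices l) x := by
  have hlen : ((l ++ [x]).length : Int) = (l.length : Int) + 1 := by
    simp [List.length_append]
  by_cases hx : pvIsBoundary x
  · -- new boundary: bounds gain l.length, slices gain [[x]]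
    have hb := pvBounds_snoc l x hl
    rw [if_pos hx] at hb
    simp only [pvSlices, hb, hlen, pvStepB, if_pos hx]
    have hcons : (0 : Int) :: (pvBounds l ++ [(l.length : Int)]) =
        (0 :: pvBounds l) ++ [(l.length : Int)] := by simp
    rw [hcons, List.zip_append (by simp), List.map_append]
    congr 1
    · refine List.map_eq_map_iff.mpr ?_
      intro p hp
      obtain ⟨hpa, hpb⟩ := List.of_mem_zip hp
      obtain ⟨ha0, ha1⟩ := pv_starts_mem hpa
      have hb' : 0 ≤ p.2 ∧ p.2 ≤ (l.length : Int) := by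
        rcases List.mem_append.mp hpb with h | h
        · have := pvBounds_mem h; omega
        · simp at h; omega
      exact pv_slice_frozen l x p.1 p.2 ha0 ha1 hb'.1 hb'.2
    · simp only [List.zip_cons_cons, List.zip_nil_right, List.map_cons, List.map_nil]
      rw [pv_slice_snoc l x _ (Int.natCast_nonneg _) (le_refl _)]
      have hempty : PySem.List.slice l (some (l.length : Int)) (some (l.length : Int)) = [] := by
        rw [PySem.List.slice_natCast]; simp
      rw [hempty]
      simp
  · -- no new boundary: the last slice is extended by x
    have hb := pvBounds_snoc l x hl
    rw [if_neg hx, List.append_nil] at hb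
    have hne : (0 : Int) :: pvBounds l ≠ [] := List.cons_ne_nil _ _
    have hsplit : ((0:Int) :: pvBounds l).dropLast ++ [((0:Int) :: pvBounds l).getLast hne] =
        (0:Int) :: pvBounds l := List.dropLast_concat_getLast hne
    have hzip : ∀ e : Int, ((0:Int) :: pvBounds l).zip (pvBounds l ++ [e]) =
        ((0:Int) :: pvBounds l).dropLast.zip (pvBounds l) ++
          [(((0:Int) :: pvBounds l).getLast hne, e)] := by
      intro e
      conv_lhs => rw [← hsplit]
      rw [List.zip_append (by simp [List.length_dropLast])]
      simp
    have hmem_al : 0 ≤ ((0:Int) :: pvBounds l).getLast hne ∧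
        ((0:Int) :: pvBounds l).getLast hne ≤ (l.length : Int) :=
      pv_starts_mem (List.getLast_mem hne)
    have hfrozen : (((0:Int) :: pvBounds l).dropLast.zip (pvBounds l)).map
          (fun p => PySem.List.slice (l ++ [x]) (some p.1) (some p.2)) =
        (((0:Int) :: pvBounds l).dropLast.zip (pvBounds l)).map
          (fun p => PySem.List.slice l (some p.1) (some p.2)) := by
      refine List.map_eq_map_iff.mpr ?_
      intro p hp
      obtain ⟨hpa, hpb⟩ := List.of_mem_zip hp
      have hpa' : p.1 ∈ (0:Int) :: pvBounds l := (List.dropLast_sublist _).subset hpa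
      obtain ⟨ha0, ha1⟩ := pv_starts_mem hpa'
      obtain ⟨hb0, hb1⟩ := pvBounds_mem hpb
      exact pv_slice_frozen l x p.1 p.2 ha0 ha1 (le_of_lt hb0) (le_of_lt hb1)
    simp only [pvSlices, hb, hlen, pvStepB, if_neg hx]
    rw [hzip ((l.length : Int) + 1), hzip (l.length : Int), List.map_append, List.map_append,
      hfrozen, List.map_cons, List.map_nil, List.map_cons, List.map_nil,
      List.dropLast_concat, List.getLastD_concat,
      pv_slice_snoc l x _ hmem_al.1 hmem_al.2]

-- B's slice decomposition equals the segment fold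
lemma pv_slices_eq (hd : String) (t : List String) :
    pvSlices (hd :: t) = t.foldl pvStepB [[hd]] := by
  induction t using List.reverseRecOn with
  | nil =>
    have hb : pvBounds [hd] = [] := by
      simp [pvBounds, PySem.List.enumerate_cons, PySem.List.enumerate_nil]
    simp only [pvSlices, hb, List.length_cons, List.length_nil, List.nil_append,
      List.zip_cons_cons, List.zip_nil_right, List.map_cons, List.map_nil, List.foldl_nil]
    have : PySem.List.slice [hd] (some (0 : Int)) (some ((1 : Nat) : Int)) = [hd] := by
      rw [show ((0:Int)) = ((0:Nat):Int) by norm_num, PySem.List.slice_natCast]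
      simp
    simpa using this
  | append_singleton t x ih =>
    rw [show hd :: (t ++ [x]) = (hd :: t) ++ [x] by simp,
      pvSlices_snoc (hd :: t) x (List.cons_ne_nil _ _), ih, List.foldl_append]
    simp

-- B's render loop is the filtered map of the rendered slices
lemma pv_render_foldl (lines : List String) (ps : List (Int × Int)) (acc : List String) :
    ps.foldl (fun acc p =>
        let text := pvJoinStrip (PySem.List.slice lines (some p.1) (some p.2))
        if text ≠ "" then acc ++ [text] else acc) acc =
      acc ++ pvRenderAll (ps.map (fun p => PySem.List.slice lines (some p.1) (some p.2))) := by
  induction ps generalizing acc with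
  | nil => simp [pvRenderAll]
  | cons p ps ih =>
    simp only [List.foldl_cons, ih, List.map_cons, pvRenderAll, List.filter_cons]
    split_ifs with h <;> simp_all

-- ===== VERDICT (by name: the statement is the Claim_ definition above) =====
theorem chunk_source_code_py_spec : Claim_equal_chunk_source_code_py := by
  intro content language _
  unfold Spec_chunk_source_code_py chunk_source_code_py chunk_source_code_py_alt
  cases h : (PySem.Chars.splitOn content.toList "\n".toList).map String.ofList with
  | nil =>
    simp [pvBounds, PySem.List.enumerate_nil, pvJoinStrip, PySem.Str.strip, PySem.Str.join,
      PySem.Chars.strip, PySem.Chars.lstrip, PySem.Chars.rstrip, PySem.Chars.join,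
      List.intercalate, PySem.List.slice]
  | cons hd t =>
    simp only [List.foldl_cons, pv_render_foldl, List.nil_append]
    have h0 : pvStepA ([], []) hd = ([], [hd]) := by simp [pvStepA]
    have hmain := pv_loop t [] [hd] (by simp)
    simp only [List.nil_append] at hmain
    rw [h0]
    have hslices : ((0 :: pvBounds (hd :: t)).zip
          (pvBounds (hd :: t) ++ [((hd :: t).length : Int)])).map
          (fun p => PySem.List.slice (hd :: t) (some p.1) (some p.2)) =
        t.foldl pvStepB [[hd]] := by
      rw [← pvSlices]; exact pv_slices_eq hd t
    rw [hslices, hmain]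
    simp [pvRenderAll]
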